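-- pv_equiv track=rewrite | github.com/Modern-Compilers-Lab/MLIR-RL | rl_autoschedular/env.py | sorted_divisors
-- ===== SOURCE A (Python) =====
-- def sorted_divisors(n: int, num_candidates: int):
--     """Get the divisors of `n` that are supperior or equal to 2
--
--     Args:
--         n (int): The upper bound.
--         num_candidates (int): The number of candidates to get.
--
--     Returns:
--         list[int]: The sorted divisors.
--     """
--
--     divisors = []
--     i = 1
--     while i <= n and len(divisors) < num_candidates:
--         if n % i == 0:
--             divisors.append(i)
--         i *= 2
--     return sorted(divisors)
-- ===== SOURCE B (Python) =====
-- def sorted_divisors(n: int, num_candidates: int):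
--     """Closed-form: the loop's hits are exactly the powers 2^0..2^v dividing n,
--     so compute the 2-adic valuation v via the lowest-set-bit trick and emit the
--     ascending prefix directly -- no doubling loop, no divisibility tests, no sort."""
--     if n < 1:
--         return []
--     v = (n & -n).bit_length() - 1
--     count = min(v + 1, num_candidates)
--     return [2 ** j for j in range(count)]
-- ===== Notes on version B (the rewrite author's own statement) =====
-- stated objective: simpler
-- what changed: Replaces A's doubling loop with divisibility tests and a final sort by a closed form: the 2-adic valuation v of n via the lowest-set-bit trick (n & -n).bit_length() - 1, then the already-sorted list [2**j for j in range(min(v+1, num_candidates))].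
import Mathlib
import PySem

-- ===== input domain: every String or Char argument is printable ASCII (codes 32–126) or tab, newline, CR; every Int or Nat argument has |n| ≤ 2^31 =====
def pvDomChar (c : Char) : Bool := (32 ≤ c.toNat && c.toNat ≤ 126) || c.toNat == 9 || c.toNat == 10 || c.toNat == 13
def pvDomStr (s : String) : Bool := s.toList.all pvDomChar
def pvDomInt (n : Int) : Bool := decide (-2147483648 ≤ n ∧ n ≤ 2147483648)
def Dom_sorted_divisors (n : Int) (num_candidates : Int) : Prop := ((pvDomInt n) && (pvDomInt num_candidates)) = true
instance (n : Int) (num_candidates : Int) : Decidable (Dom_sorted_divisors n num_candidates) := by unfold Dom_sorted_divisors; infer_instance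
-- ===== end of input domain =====

-- B replaces A's doubling loop (divisibility tests + final sort) by the closed form
-- [2^j for j < min(v+1, num_candidates)] where v is read off n & -n; objective: simpler.


-- ===== PORT A =====
-- the while loop; `hi` only carries 1 ≤ i for termination
def sortedDivLoop (n num_candidates i : Int) (divs : List Int) (hi : 1 ≤ i) : List Int :=
  if h : i ≤ n ∧ (divs.length : Int) < num_candidates then
    sortedDivLoop n num_candidates (i * 2)
      (if PySem.Int.mod n i = 0 then divs ++ [i] else divs) (by omega)
  else divs
termination_by (n + 1 - i).toNat
decreasing_by omega

def sorted_divisors (n : Int) (num_candidates : Int) : List Int :=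
  PySem.List.sorted (sortedDivLoop n num_candidates 1 [] (by norm_num)) (fun x => x)

-- ===== PORT B =====
def sorted_divisors_alt (n : Int) (num_candidates : Int) : List Int :=
  if n < 1 then []
  else
    let v : Int := (PySem.Int.bitLength (PySem.Int.band n (-n)) : Int) - 1
    let count := min (v + 1) num_candidates
    (PySem.List.pyRange 0 count 1).map (fun j => (2 : Int) ^ j.toNat)

-- ===== PRECONDITION & SPEC =====
def Spec_sorted_divisors (n : Int) (num_candidates : Int) (out : List Int) : Prop := out = sorted_divisors_alt n num_candidates
instance (n : Int) (num_candidates : Int) (out : List Int) : Decidable (Spec_sorted_divisors n num_candidates out) := by unfold Spec_sorted_divisors; infer_instance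

-- ===== CLAIM (what is proved, stated in full; the proofs are below) =====
def Claim_equal_sorted_divisors : Prop := ∀ (n : Int) (num_candidates : Int), Dom_sorted_divisors n num_candidates → Spec_sorted_divisors n num_candidates (sorted_divisors n num_candidates)

-- ===== LEMMAS AND PROOFS =====

-- (2b+1) &&& 2b = 2b
theorem and_odd (b : Nat) : (2 * b + 1) &&& (2 * b) = 2 * b := by
  apply Nat.eq_of_testBit_eq
  intro i
  cases i with
  | zero => simp [Nat.testBit_zero, Nat.mul_mod_right]
  | succ i =>
      have h1 : (2 * b + 1) / 2 = b := by omega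
      have h2 : (2 * b) / 2 = b := by omega
      rw [Nat.testBit_land]
      simp only [Nat.testBit_succ, h1, h2, Bool.and_self]

-- (2c) &&& (2c-1) = 2 * (c &&& (c-1)) for c > 0
theorem and_even (c : Nat) (hc : 0 < c) : (2 * c) &&& (2 * c - 1) = 2 * (c &&& (c - 1)) := by
  apply Nat.eq_of_testBit_eq
  intro i
  cases i with
  | zero =>
      simp [Nat.testBit_zero, Nat.mul_mod_right]
  | succ i =>
      have h1 : (2 * c) / 2 = c := by omega
      have h2 : (2 * c - 1) / 2 = c - 1 := by omega
      have h3 : (2 * (c &&& (c - 1))) / 2 = c &&& (c - 1) := by omega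
      rw [Nat.testBit_land]
      simp only [Nat.testBit_succ, h1, h2, h3]
      rw [Nat.testBit_land]

-- lowest set bit: N - (N &&& (N-1)) = 2^k where N = 2^k * m, m odd
theorem nat_lowbit : ∀ N : Nat, 0 < N →
    ∃ k m : Nat, m % 2 = 1 ∧ N = 2 ^ k * m ∧ N - (N &&& (N - 1)) = 2 ^ k := by
  intro N
  induction N using Nat.strong_induction_on with
  | _ N ih =>
    intro hN
    rcases Nat.even_or_odd N with he | ho
    · obtain ⟨c, hc⟩ := he
      have hc2 : N = 2 * c := by omega
      have hcpos : 0 < c := by omega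
      obtain ⟨k, m, hm, heq, hand⟩ := ih c (by omega) hcpos
      refine ⟨k + 1, m, hm, by rw [hc2, heq]; ring, ?_⟩
      have hle : c &&& (c - 1) ≤ c := Nat.and_le_left
      rw [hc2, and_even c hcpos]
      omega
    · obtain ⟨b, hb⟩ := ho
      subst hb
      refine ⟨0, 2 * b + 1, by omega, by omega, ?_⟩
      have h2 : 2 * b + 1 - 1 = 2 * b := by omega
      rw [h2, and_odd]
      omega

-- band n (-n) for positive n, in Nat terms
theorem band_pos_neg (n : Int) (hn : 1 ≤ n) :
    PySem.Int.band n (-n) = ((n.toNat - (n.toNat &&& (n.toNat - 1)) : Nat) : Int) := by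
  unfold PySem.Int.band
  rw [if_pos (by omega), if_neg (by omega)]
  have : (-(-n) - 1).toNat = n.toNat - 1 := by omega
  rw [this]

theorem bitLength_two_pow (k : Nat) : PySem.Int.bitLength ((2 ^ k : Nat) : Int) = k + 1 := by
  induction k with
  | zero => decide
  | succ k ih =>
      rw [PySem.Int.bitLength_natCast (by positivity)]
      have : 2 ^ (k + 1) / 2 = 2 ^ k := by
        rw [pow_succ]; omega
      rw [this, ih]

-- phase 2: once i no longer divides n, nothing more is ever appended
theorem phase2 (n num i : Int) (divs : List Int) (hi : 1 ≤ i) (h : ¬ i ∣ n) :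
    sortedDivLoop n num i divs hi = divs := by
  rw [sortedDivLoop]
  split
  · rw [if_neg (by rw [PySem.Int.mod_eq_zero_iff_dvd]; exact h)]
    exact phase2 n num (i * 2) divs (by omega) (fun hd => h (dvd_trans (Dvd.intro 2 rfl) hd))
  · rfl
termination_by (n + 1 - i).toNat
decreasing_by omega

-- phase 1: while 2^j still divides n, the loop appends the next powers of two
theorem phase1 (n num : Int) (k : Nat) (hdvd : ∀ j : Nat, ((2 : Int) ^ j ∣ n ↔ j ≤ k))
    (hn : 1 ≤ n) :
    ∀ (j : Nat) (i : Int), i = (2 : Int) ^ j → j ≤ k → ∀ (divs : List Int) (hi : 1 ≤ i),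
      sortedDivLoop n num i divs hi =
        divs ++ (List.range (min (k + 1 - j) (num - divs.length).toNat)).map
          (fun s => (2 : Int) ^ (j + s)) := by
  intro j
  induction hd : k - j generalizing j with
  | zero =>
      intro i hij hj divs hi
      have hjk : j = k := by omega
      subst hjk
      subst hij
      rw [sortedDivLoop]
      split
      · rename_i hcond
        rw [if_pos (by rw [PySem.Int.mod_eq_zero_iff_dvd]; exact (hdvd j).2 le_rfl)]
        have hnot : ¬ ((2 : Int) ^ j * 2 ∣ n) := by
          intro hdd
          have : (2 : Int) ^ (j + 1) ∣ n := by rw [pow_succ]; exact hdd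
          exact absurd ((hdvd (j + 1)).1 this) (by omega)
        rw [phase2 n num _ _ _ hnot]
        have h4 : min (j + 1 - j) (num - (divs.length : Int)).toNat = 1 := by
          have := hcond.2; omega
        rw [h4]
        simp
      · rename_i hcond
        push_neg at hcond
        have hle : (2 : Int) ^ j ≤ n := Int.le_of_dvd (by omega) ((hdvd j).2 le_rfl)
        have h0 : (num - (divs.length : Int)).toNat = 0 := by
          have := hcond hle; omega
        rw [h0]
        simp
  | succ t iht =>
      intro i hij hj divs hi
      rw [sortedDivLoop]
      split
      · rename_i hcond
        subst hij
        rw [if_pos (by rw [PySem.Int.mod_eq_zero_iff_dvd]; exact (hdvd j).2 hj)]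
        have hpow : (2 : Int) ^ j * 2 = (2 : Int) ^ (j + 1) := by rw [pow_succ]
        rw [iht (j + 1) (by omega) ((2 : Int) ^ j * 2) hpow (by omega)
            (divs ++ [(2 : Int) ^ j]) (by omega)]
        have hlen : ((divs ++ [(2 : Int) ^ j]).length : Int) = (divs.length : Int) + 1 := by
          simp
        rw [hlen]
        have hmin : min (k + 1 - j) (num - (divs.length : Int)).toNat =
            min (k + 1 - (j + 1)) (num - ((divs.length : Int) + 1)).toNat + 1 := by
          have := hcond.2; omega
        rw [hmin, List.range_succ_eq_map]
        simp only [List.map_cons, List.map_map, List.append_assoc, List.cons_append,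
          List.nil_append]
        congr 2
        apply List.map_congr_left
        intro s _
        simp only [Function.comp_apply]
        congr 1
        omega
      · rename_i hcond
        subst hij
        push_neg at hcond
        have hle : (2 : Int) ^ j ≤ n := Int.le_of_dvd (by omega) ((hdvd j).2 hj)
        have h0 : (num - (divs.length : Int)).toNat = 0 := by
          have := hcond hle; omega
        rw [h0]
        simp

-- the divisibility characterisation coming from the odd-part decomposition
theorem dvd_char (k m : Nat) (hm : m % 2 = 1) (j : Nat) :
    ((2 : Int) ^ j ∣ ((2 ^ k * m : Nat) : Int)) ↔ j ≤ k := by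
  have hcast : ((2 : Int) ^ j) = ((2 ^ j : Nat) : Int) := by push_cast; ring
  rw [hcast, Int.natCast_dvd_natCast]
  constructor
  · intro hd
    by_contra hjk
    push_neg at hjk
    have h1 : 2 ^ (k + 1) ∣ 2 ^ j := pow_dvd_pow 2 (by omega)
    have h2 : 2 ^ (k + 1) ∣ 2 ^ k * m := h1.trans hd
    rw [pow_succ] at h2
    have h3 : 2 ∣ m := (mul_dvd_mul_iff_left (a := 2 ^ k) (by positivity)).1 h2
    omega
  · intro hjk
    exact dvd_mul_of_dvd_left (pow_dvd_pow 2 hjk) m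

theorem sorted_map_pow (c : Nat) :
    PySem.List.sorted ((List.range c).map (fun s => (2 : Int) ^ (0 + s))) (fun x => x) =
      (List.range c).map (fun s => (2 : Int) ^ (0 + s)) := by
  apply PySem.List.sorted_eq_self_of_pairwise
  refine List.Pairwise.map _ ?_ List.pairwise_lt_range
  intro a b hab
  exact pow_le_pow_right₀ (by norm_num) (by omega)

-- ===== VERDICT (by name: the statement is the Claim_ definition above) =====
theorem sorted_divisors_spec : Claim_equal_sorted_divisors := by
  intro n num _
  unfold Spec_sorted_divisors sorted_divisors sorted_divisors_alt
  by_cases hn : n < 1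
  · rw [if_pos hn]
    rw [show sortedDivLoop n num 1 [] (by norm_num) = [] by
      rw [sortedDivLoop]; rw [dif_neg (by push_neg; intro h; omega)]]
    simp [PySem.List.sorted]
  · push_neg at hn
    obtain ⟨k, m, hm, hNeq, hand⟩ := nat_lowbit n.toNat (by omega)
    have hn_eq : n = ((2 ^ k * m : Nat) : Int) := by omega
    have hdvd : ∀ j : Nat, ((2 : Int) ^ j ∣ n ↔ j ≤ k) := by
      intro j; rw [hn_eq]; exact dvd_char k m hm j
    have hband : PySem.Int.band n (-n) = ((2 ^ k : Nat) : Int) := by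
      rw [band_pos_neg n hn, hand]
    have hA := phase1 n num k hdvd hn 0 1 (by norm_num) (Nat.zero_le k) [] (by norm_num)
    rw [hA, if_neg (by omega)]
    show PySem.List.sorted ([] ++ (List.range (min (k + 1 - 0)
          (num - (([] : List Int).length : Int)).toNat)).map (fun s => (2 : Int) ^ (0 + s)))
        (fun x => x) =
      (PySem.List.pyRange 0 (min (((PySem.Int.bitLength (PySem.Int.band n (-n)) : Int) - 1) + 1)
          num)).map (fun j => (2 : Int) ^ j.toNat)
    rw [hband, bitLength_two_pow, PySem.List.pyRange_one]
    simp only [List.nil_append, List.map_map]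
    rw [sorted_map_pow]
    have hc : ((min (((k + 1 : Nat) : Int) - 1 + 1) num) - 0).toNat =
        min (k + 1 - 0) (num - (([] : List Int).length : Int)).toNat := by
      simp; omega
    rw [hc]
    apply List.map_congr_left
    intro s hs
    simp only [Function.comp_apply]
    have h5 : ((0 : Int) + (s : Nat)).toNat = 0 + s := by omega
    rw [h5]
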